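-- pv_equiv track=rewrite | github.com/MacJediWizard/TimeTracker | app/routes/tasks.py | _is_safe_next_url
-- ===== SOURCE A (Python) =====
-- ALLOWED_NEXT_PREFIXES = ("/kanban", "/gantt", "/tasks", "/projects")
--
-- def _is_safe_next_url(next_url):
--     """Validate next URL to avoid open redirects. Allow relative paths with allowed prefixes."""
--     if not next_url or not isinstance(next_url, str):
--         return False
--     next_url = next_url.strip()
--     if not next_url.startswith("/") or next_url.startswith("//"):
--         return False
--     return any(
--         next_url == p or next_url.startswith(p + "?") or next_url.startswith(p + "#") for p in ALLOWED_NEXT_PREFIXES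
--     )
-- ===== SOURCE B (Python) =====
-- ALLOWED_NEXT_PREFIXES = ("/kanban", "/gantt", "/tasks", "/projects")
--
-- def _is_safe_next_url(next_url):
--     """Validate next URL to avoid open redirects. Allow relative paths with allowed prefixes."""
--     if not next_url or not isinstance(next_url, str):
--         return False
--     s = next_url.strip()
--     if not s.startswith("/") or s.startswith("//"):
--         return False
--     # cut off the query/fragment: keep characters up to the first '?' or '#'
--     base_chars = []
--     for c in s:
--         if c == "?" or c == "#":
--             break
--         base_chars.append(c)
--     return "".join(base_chars) in ALLOWED_NEXT_PREFIXES
-- ===== Notes on version B (the rewrite author's own statement) =====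
-- stated objective: simpler
-- what changed: A tests each allowed prefix three ways (equality, prefix+'?', prefix+'#'); B instead cuts the stripped URL at the first '?' or '#' in one scan and does a single membership test of that base path in the allowed set.
import Mathlib
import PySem

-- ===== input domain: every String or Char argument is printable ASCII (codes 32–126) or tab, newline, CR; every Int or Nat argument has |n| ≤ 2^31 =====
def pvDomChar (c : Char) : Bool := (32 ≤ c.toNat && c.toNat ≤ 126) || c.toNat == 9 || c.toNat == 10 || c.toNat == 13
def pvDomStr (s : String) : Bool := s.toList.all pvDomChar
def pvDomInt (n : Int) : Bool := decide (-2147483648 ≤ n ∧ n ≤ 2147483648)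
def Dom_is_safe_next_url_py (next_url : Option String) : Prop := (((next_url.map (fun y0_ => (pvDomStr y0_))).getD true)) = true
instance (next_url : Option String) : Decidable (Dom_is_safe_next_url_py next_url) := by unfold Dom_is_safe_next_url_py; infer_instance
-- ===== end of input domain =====

-- B replaces A's any-over-prefixes (equal / prefix+'?' / prefix+'#') by one scan that cuts the
-- string at the first '?' or '#' and a single membership test of that base path (objective: simpler).

-- ===== PORT A =====
def is_safe_next_url_py (next_url : Option String) : Bool :=
  match next_url with
  | none => false
  | some s0 =>
    if s0 = "" then false
    else
      let s := PySem.Str.strip s0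
      if !(PySem.Str.startswith s "/") || PySem.Str.startswith s "//" then false
      else
        (["/kanban", "/gantt", "/tasks", "/projects"] : List String).any (fun p =>
          s == p || PySem.Str.startswith s (p ++ "?") || PySem.Str.startswith s (p ++ "#"))

-- ===== PORT B =====
-- the for-loop with break of Source B: collect characters until the first '?' or '#'
def pvBaseChars : List Char → List Char
  | [] => []
  | c :: rest => if c = '?' ∨ c = '#' then [] else c :: pvBaseChars rest

def is_safe_next_url_py_alt (next_url : Option String) : Bool :=
  match next_url with
  | none => false
  | some s0 =>
    if s0 = "" then false
    else
      let s := PySem.Str.strip s0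
      if !(PySem.Str.startswith s "/") || PySem.Str.startswith s "//" then false
      else
        (["/kanban", "/gantt", "/tasks", "/projects"] : List String).contains
          (String.ofList (pvBaseChars s.toList))

-- ===== PRECONDITION & SPEC =====
def Spec_is_safe_next_url_py (next_url : Option String) (out : Bool) : Prop := out = is_safe_next_url_py_alt next_url
instance (next_url : Option String) (out : Bool) : Decidable (Spec_is_safe_next_url_py next_url out) := by unfold Spec_is_safe_next_url_py; infer_instance

-- ===== CLAIM (what is proved, stated in full; the proofs are below) =====
def Claim_equal_is_safe_next_url_py : Prop := ∀ (next_url : Option String), Dom_is_safe_next_url_py next_url → Spec_is_safe_next_url_py next_url (is_safe_next_url_py next_url)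

-- ===== LEMMAS AND PROOFS =====

-- the cut characterisation: for a pattern p free of '?' and '#', the base path equals p exactly
-- when the string is p itself or starts with p followed by '?' or '#'
lemma pvBaseChars_eq_iff (p : List Char) (hp : ∀ c ∈ p, ¬(c = '?' ∨ c = '#')) :
    ∀ l : List Char, (pvBaseChars l = p ↔ (l = p ∨ (p ++ ['?']) <+: l ∨ (p ++ ['#']) <+: l)) := by
  induction p with
  | nil =>
    intro l
    cases l with
    | nil => simp [pvBaseChars]
    | cons c rest =>
      simp only [pvBaseChars, List.nil_append, List.cons_prefix_cons]
      by_cases h : c = '?' ∨ c = '#'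
      · rw [if_pos h]
        simp only [true_iff, List.cons_ne_nil, false_or]
        rcases h with h | h <;> subst h <;> simp
      · rw [if_neg h]
        rw [not_or] at h
        simp [Ne.symm h.1, Ne.symm h.2]
  | cons a p' ih =>
    have ha : ¬(a = '?' ∨ a = '#') := hp a (by simp)
    have hp' : ∀ c ∈ p', ¬(c = '?' ∨ c = '#') := fun c hc => hp c (by simp [hc])
    intro l
    cases l with
    | nil => simp [pvBaseChars]
    | cons c rest =>
      simp only [pvBaseChars, List.cons_append, List.cons_prefix_cons, List.cons.injEq]
      by_cases h : c = '?' ∨ c = '#'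
      · have hca : a ≠ c := by rintro rfl; exact ha h
        rw [if_pos h]
        constructor
        · intro hfalse; exact absurd hfalse.symm (by simp)
        · rintro (⟨h1, _⟩ | ⟨h1, _⟩ | ⟨h1, _⟩) <;> simp_all
      · rw [if_neg h, List.cons.injEq]
        rw [ih hp' rest]
        constructor
        · rintro ⟨rfl, h2⟩; tauto
        · rintro (⟨rfl, h2⟩ | ⟨rfl, h2⟩ | ⟨rfl, h2⟩) <;> exact ⟨rfl, by tauto⟩

-- one disjunct of A's any equals one equality test of B's membership
lemma pv_one (p s : String) (hp : ∀ c ∈ p.toList, ¬(c = '?' ∨ c = '#')) :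
    (s == p || PySem.Str.startswith s (p ++ "?") || PySem.Str.startswith s (p ++ "#"))
      = (String.ofList (pvBaseChars s.toList) == p) := by
  rw [Bool.eq_iff_iff]
  simp only [Bool.or_eq_true, beq_iff_eq, PySem.Str.startswith_eq, PySem.Chars.startswith_iff,
    String.toList_append]
  have h9 : ("?" : String).toList = ['?'] := by simp
  have h10 : ("#" : String).toList = ['#'] := by simp
  rw [h9, h10]
  have hof : (String.ofList (pvBaseChars s.toList) = p) ↔ pvBaseChars s.toList = p.toList := by
    rw [← String.toList_inj, String.toList_ofList]
  rw [hof, pvBaseChars_eq_iff p.toList hp s.toList, String.toList_inj]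
  tauto

lemma pv_core (s : String) :
    (["/kanban", "/gantt", "/tasks", "/projects"] : List String).any (fun p =>
        s == p || PySem.Str.startswith s (p ++ "?") || PySem.Str.startswith s (p ++ "#"))
      = (["/kanban", "/gantt", "/tasks", "/projects"] : List String).contains
          (String.ofList (pvBaseChars s.toList)) := by
  have e1 : ("/kanban" : String).toList = ['/','k','a','n','b','a','n'] := by simp
  have e2 : ("/gantt" : String).toList = ['/','g','a','n','t','t'] := by simp
  have e3 : ("/tasks" : String).toList = ['/','t','a','s','k','s'] := by simp
  have e4 : ("/projects" : String).toList = ['/','p','r','o','j','e','c','t','s'] := by simp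
  have h1 := pv_one "/kanban" s (by rw [e1]; simp)
  have h2 := pv_one "/gantt" s (by rw [e2]; simp)
  have h3 := pv_one "/tasks" s (by rw [e3]; simp)
  have h4 := pv_one "/projects" s (by rw [e4]; simp)
  simp only [List.any_cons, List.any_nil, List.contains_cons, List.contains_nil,
    Bool.or_false] at *
  rw [h1, h2, h3, h4]

-- ===== VERDICT (by name: the statement is the Claim_ definition above) =====
theorem is_safe_next_url_py_spec : Claim_equal_is_safe_next_url_py := by
  intro next_url _
  unfold Spec_is_safe_next_url_py
  cases next_url with
  | none => rfl
  | some s0 =>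
    simp only [is_safe_next_url_py, is_safe_next_url_py_alt]
    by_cases h0 : s0 = ""
    · rw [if_pos h0, if_pos h0]
    · rw [if_neg h0, if_neg h0]
      cases hg : (!(PySem.Str.startswith (PySem.Str.strip s0) "/")
          || PySem.Str.startswith (PySem.Str.strip s0) "//") with
      | true => rw [if_pos rfl, if_pos rfl]
      | false =>
        rw [if_neg (by simp), if_neg (by simp)]
        exact pv_core (PySem.Str.strip s0)
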